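-- pv_equiv track=rewrite | github.com/curieshicy/My_Utilities_Code | Useful_Code_Snippets/5_calculate_maximum_subarray_sum.py | calculate_minimum_subarray_sum
-- ===== SOURCE A (Python) =====
-- def calculate_minimum_subarray_sum(nums):
--
--     if all(num < 0 for num in nums):
--         return 0
--
--     min_sum = 0
--     for num in nums:
--         if min_sum + num > min_sum:
--             continue
--         else:
--             min_sum += num
--     return min_sum
-- ===== SOURCE B (Python) =====
-- def calculate_minimum_subarray_sum(nums):
--     srt = sorted(nums)
--     if srt and srt[-1] < 0:
--         return 0
--     total = 0
--     for x in srt: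
--         if x > 0:
--             break
--         total += x
--     return total
-- ===== Notes on version B (the rewrite author's own statement) =====
-- stated objective: alternative
-- what changed: Sort-then-prefix-scan: sorts the list, decides the all-negative case by looking at the maximum (last sorted element), and sums the non-positive prefix of the sorted list with an early break, instead of A's all() pre-scan plus a full accumulation loop.
import Mathlib
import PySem

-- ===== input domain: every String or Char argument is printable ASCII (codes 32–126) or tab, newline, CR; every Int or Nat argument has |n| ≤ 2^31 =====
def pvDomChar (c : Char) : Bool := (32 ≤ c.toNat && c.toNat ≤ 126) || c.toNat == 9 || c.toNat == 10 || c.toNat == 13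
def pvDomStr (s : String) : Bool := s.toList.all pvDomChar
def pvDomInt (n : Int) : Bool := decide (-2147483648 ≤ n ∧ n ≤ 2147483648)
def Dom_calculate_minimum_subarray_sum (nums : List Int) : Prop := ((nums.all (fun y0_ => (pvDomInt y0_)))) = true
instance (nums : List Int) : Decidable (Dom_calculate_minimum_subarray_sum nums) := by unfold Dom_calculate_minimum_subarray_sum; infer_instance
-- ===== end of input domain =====

-- B replaces A's all() pre-scan + full accumulation loop by sort-then-prefix-scan:
-- sort, decide the all-negative case from the sorted maximum, sum the non-positive
-- prefix with an early break (objective: alternative algorithm, same result).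

-- ===== PORT A =====
def calculate_minimum_subarray_sum (nums : List Int) : Int :=
  if nums.all (fun num => decide (num < 0)) then 0
  else
    nums.foldl (fun min_sum num =>
      if min_sum + num > min_sum then min_sum else min_sum + num) 0

-- ===== PORT B =====
-- the 'for x in srt: if x > 0: break; total += x' loop of Source B
def pvSumPrefix (l : List Int) (total : Int) : Int :=
  match l with
  | [] => total
  | x :: xs => if x > 0 then total else pvSumPrefix xs (total + x)

def calculate_minimum_subarray_sum_alt (nums : List Int) : Int :=
  let srt := PySem.List.sorted nums (fun x => x) false
  match srt.getLast? with      -- 'if srt and srt[-1] < 0: return 0'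
  | some m => if m < 0 then 0 else pvSumPrefix srt 0
  | none => pvSumPrefix srt 0

-- ===== PRECONDITION & SPEC =====
def Spec_calculate_minimum_subarray_sum (nums : List Int) (out : Int) : Prop := out = calculate_minimum_subarray_sum_alt nums
instance (nums : List Int) (out : Int) : Decidable (Spec_calculate_minimum_subarray_sum nums out) := by unfold Spec_calculate_minimum_subarray_sum; infer_instance

-- ===== CLAIM =====
def Claim_equal_calculate_minimum_subarray_sum : Prop := ∀ (nums : List Int), Dom_calculate_minimum_subarray_sum nums → Spec_calculate_minimum_subarray_sum nums (calculate_minimum_subarray_sum nums)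

-- ===== LEMMAS AND PROOFS =====

-- A's accumulation loop from any start adds exactly the non-positive elements.
theorem loopA_eq (nums : List Int) :
    ∀ (s : Int),
      nums.foldl (fun min_sum num =>
        if min_sum + num > min_sum then min_sum else min_sum + num) s
      = s + (nums.filter (fun num => decide (num ≤ 0))).sum := by
  induction nums with
  | nil => intro s; simp
  | cons x xs ih =>
    intro s
    rw [List.foldl_cons, List.filter_cons]
    by_cases hx : x ≤ 0
    · rw [if_neg (by omega : ¬ (s + x > s)), ih]
      simp only [hx, decide_true, if_pos, List.sum_cons]
      ring
    · rw [if_pos (by omega : s + x > s), ih]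
      simp [hx]

-- on an ascending list, B's break-loop sums exactly the non-positive elements.
theorem pvSumPrefix_eq (l : List Int) (hp : l.Pairwise (· ≤ ·)) :
    ∀ t : Int, pvSumPrefix l t = t + (l.filter (fun num => decide (num ≤ 0))).sum := by
  induction l with
  | nil => intro t; simp [pvSumPrefix]
  | cons x xs ih =>
    intro t
    rw [List.pairwise_cons] at hp
    rw [pvSumPrefix, List.filter_cons]
    by_cases hx : x > 0
    · have hfil : xs.filter (fun num => decide (num ≤ 0)) = [] := by
        rw [List.filter_eq_nil_iff]
        intro a ha
        have := hp.1 a ha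
        simpa using (by omega : ¬ a ≤ 0)
      rw [if_pos hx]
      have : ¬ x ≤ 0 := by omega
      simp [this, hfil]
    · rw [if_neg hx, ih hp.2]
      have : x ≤ 0 := by omega
      simp [this]
      ring

-- last element of an ascending list bounds every element.
theorem getLast?_ub (l : List Int) (hp : l.Pairwise (· ≤ ·)) (m : Int)
    (hm : l.getLast? = some m) : ∀ a ∈ l, a ≤ m := by
  induction l with
  | nil => simp at hm
  | cons x xs ih =>
    rw [List.pairwise_cons] at hp
    intro a ha
    cases xs with
    | nil =>
      simp at hm ha
      omega
    | cons y ys =>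
      rw [List.getLast?_cons_cons] at hm
      rcases List.mem_cons.mp ha with rfl | ha'
      · have hmem : m ∈ y :: ys := List.mem_of_getLast? hm
        exact hp.1 m hmem
      · exact ih hp.2 hm a ha'

-- ===== VERDICT =====
theorem calculate_minimum_subarray_sum_spec : Claim_equal_calculate_minimum_subarray_sum := by
  intro nums _
  unfold Spec_calculate_minimum_subarray_sum calculate_minimum_subarray_sum
    calculate_minimum_subarray_sum_alt
  have hperm : (PySem.List.sorted nums (fun x => x) false).Perm nums :=
    PySem.List.sorted_perm nums (fun x => x) false
  have hpair : (PySem.List.sorted nums (fun x => x) false).Pairwise (· ≤ ·) :=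
    PySem.List.sorted_pairwise nums (fun x => x)
  have hsum : ((PySem.List.sorted nums (fun x => x) false).filter
      (fun num => decide (num ≤ 0))).sum
      = (nums.filter (fun num => decide (num ≤ 0))).sum :=
    (hperm.filter _).sum_eq
  set srt := PySem.List.sorted nums (fun x => x) false with hsrt
  by_cases h : (nums.all fun num => decide (num < 0)) = true
  · rw [if_pos h]
    cases hl : srt.getLast? with
    | none =>
      have he : srt = [] := List.getLast?_eq_none_iff.mp hl
      simp only [hl]
      simp [he, pvSumPrefix]
    | some m =>
      have hmem : m ∈ srt := List.mem_of_getLast? hl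
      have hmn : m ∈ nums := (PySem.List.mem_sorted _ _ _ _).mp hmem
      have hm0 := List.all_eq_true.mp h m hmn
      simp only [decide_eq_true_eq] at hm0
      simp only [hl]
      simp [hm0]
  · rw [if_neg h]
    have hagree : pvSumPrefix srt 0 = nums.foldl (fun min_sum num =>
        if min_sum + num > min_sum then min_sum else min_sum + num) 0 := by
      rw [loopA_eq, pvSumPrefix_eq srt hpair, hsum]
    cases hl : srt.getLast? with
    | none => simp only [hl]; exact hagree.symm
    | some m =>
      -- not all negative ⇒ some x ≥ 0 ⇒ m ≥ x ≥ 0 ⇒ the 0-branch is not taken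
      simp only [List.all_eq_true, not_forall] at h
      obtain ⟨x, hx, hnx⟩ := h
      simp only [decide_eq_true_eq] at hnx
      have hxm : x ≤ m := getLast?_ub srt hpair m hl x ((PySem.List.mem_sorted _ _ _ _).mpr hx)
      simp only [hl]
      rw [if_neg (by omega : ¬ m < 0)]
      exact hagree.symm
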